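-- pv_equiv track=rewrite | github.com/ericktokuda/imgviewer | src/utils.py | get_images_cameras_from_list
-- ===== SOURCE A (Python) =====
-- def get_images_cameras_from_list(files):
--     imgs = {}
--     for f in files:
--         if not f.endswith('.jpg'): continue
--         cam1 = f.split('-')[0]
--
--         if cam1 in imgs.keys():
--             imgs[cam1].append(f)
--         else:
--             imgs[cam1] = [f]
--
--     cams = set(imgs.keys())
--     return imgs, cams
-- ===== SOURCE B (Python) =====
-- def get_images_cameras_from_list(files):
--     jpgs = [f for f in files if f.endswith('.jpg')]
--     cams_order = []
--     for f in jpgs: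
--         cam = f.split('-')[0]
--         if cam not in cams_order:
--             cams_order.append(cam)
--     imgs = {cam: [f for f in jpgs if f.split('-')[0] == cam] for cam in cams_order}
--     return imgs, set(cams_order)
-- ===== Notes on version B (the rewrite author's own statement) =====
-- stated objective: alternative
-- what changed: A builds the dict incrementally (one pass, appending to the bucket of each file's prefix); B works in staged passes: filter the .jpg files, collect the distinct camera prefixes in first-occurrence order, then build each camera's list by filtering the jpg list per camera.
import Mathlib
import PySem

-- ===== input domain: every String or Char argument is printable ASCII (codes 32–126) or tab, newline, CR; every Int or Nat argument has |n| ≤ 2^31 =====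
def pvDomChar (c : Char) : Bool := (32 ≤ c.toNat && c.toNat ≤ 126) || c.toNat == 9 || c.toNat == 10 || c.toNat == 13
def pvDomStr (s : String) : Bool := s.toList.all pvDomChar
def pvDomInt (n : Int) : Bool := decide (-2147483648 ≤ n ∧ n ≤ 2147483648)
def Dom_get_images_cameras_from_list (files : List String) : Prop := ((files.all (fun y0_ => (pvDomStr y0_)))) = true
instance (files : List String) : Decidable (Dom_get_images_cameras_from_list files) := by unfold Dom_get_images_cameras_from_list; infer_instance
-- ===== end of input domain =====

-- B rebuilds the same grouping in staged passes (filter, dedup prefixes, per-camera filter) instead of A's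
-- one-pass incremental dict; return value only, equal on all inputs (A is total).

-- shared helper: f.split('-')[0] (split with a non-empty separator is never empty, so [0] is total)
def camOf (f : String) : String := ((PySem.Str.split? f "-").getD []).headD ""

-- ===== PORT A =====
def get_images_cameras_from_list (files : List String) : (List (String × List String)) × List String :=
  let imgs := files.foldl (fun d f =>
    if PySem.Str.endswith f ".jpg" = true then
      let cam1 := camOf f
      if d.contains cam1 then
        d.insert cam1 (d.getD cam1 [] ++ [f])
      else
        d.insert cam1 [f]
    else d) PySem.Dict.empty
  (imgs.items, PySem.Set.ofList imgs.keys)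

-- ===== PORT B =====
def get_images_cameras_from_list_alt (files : List String) : (List (String × List String)) × List String :=
  let jpgs := files.filter (fun f => PySem.Str.endswith f ".jpg")
  let cams_order := jpgs.foldl (fun acc f =>
    let cam := camOf f
    if acc.contains cam then acc else acc ++ [cam]) []
  let imgs := cams_order.map (fun cam => (cam, jpgs.filter (fun f => camOf f == cam)))
  (imgs, PySem.Set.ofList cams_order)

-- ===== PRECONDITION & SPEC =====
def Spec_get_images_cameras_from_list (files : List String) (out : (List (String × List String)) × List String) : Prop := out = get_images_cameras_from_list_alt files
instance (files : List String) (out : (List (String × List String)) × List String) : Decidable (Spec_get_images_cameras_from_list files out) := by unfold Spec_get_images_cameras_from_list; infer_instance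

-- ===== CLAIM (what is proved, stated in full; the proofs are below) =====
def Claim_equal_get_images_cameras_from_list : Prop := ∀ (files : List String), Dom_get_images_cameras_from_list files → Spec_get_images_cameras_from_list files (get_images_cameras_from_list files)

-- ===== LEMMAS AND PROOFS =====

-- A's loop body, with both dict branches fused into a single modify
lemma stepA_eq_modify (d : PySem.Dict String (List String)) (f : String) :
    (if PySem.Str.endswith f ".jpg" = true then
      (if d.contains (camOf f) then d.insert (camOf f) (d.getD (camOf f) [] ++ [f])
       else d.insert (camOf f) [f])
     else d)
    = (if PySem.Str.endswith f ".jpg" = true then d.modify (camOf f) [] (· ++ [f]) else d) := by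
  by_cases h : d.contains (camOf f)
  · simp only [h, if_true]
    rfl
  · simp only [h, Bool.false_eq_true, if_false]
    rw [show d.modify (camOf f) [] (· ++ [f]) = d.insert (camOf f) (d.getD (camOf f) [] ++ [f]) from rfl,
        PySem.Dict.getD_of_not_contains d [] (by simpa using h)]
    rfl

-- A's dict, rewritten as a grouping fold over the filtered jpg list
lemma dictA_eq (files : List String) :
    files.foldl (fun d f =>
      if PySem.Str.endswith f ".jpg" = true then
        (if d.contains (camOf f) then d.insert (camOf f) (d.getD (camOf f) [] ++ [f])
         else d.insert (camOf f) [f])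
      else d) PySem.Dict.empty
    = (files.filter (fun f => PySem.Str.endswith f ".jpg")).foldl
        (fun d f => d.modify (camOf f) [] (· ++ [f])) PySem.Dict.empty := by
  rw [PySem.List.foldl_congr_mem _ _ _ _ (fun d f _ => stepA_eq_modify d f),
      PySem.List.foldl_ite_eq_foldl_filter (fun f => PySem.Str.endswith f ".jpg" = true)]
  simp

-- B's camera-order accumulator is set(map(camOf, jpgs)) in first-occurrence order
lemma orderB_eq (jpgs : List String) :
    jpgs.foldl (fun acc f =>
      if acc.contains (camOf f) then acc else acc ++ [camOf f]) []
    = PySem.Set.ofList (jpgs.map camOf) := by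
  rw [PySem.Set.ofList_eq_foldl, List.foldl_map]
  rfl

-- the grouping fold's keys are exactly that set
lemma keysA_eq (jpgs : List String) :
    (jpgs.foldl (fun d f => d.modify (camOf f) [] (· ++ [f])) PySem.Dict.empty).keys
    = PySem.Set.ofList (jpgs.map camOf) := by
  rw [PySem.Dict.keys_foldl_modify_key jpgs camOf [] (fun _ x => (· ++ [x])) PySem.Dict.empty,
      PySem.Dict.keys_empty, PySem.Set.ofList_eq_foldl]
  rfl

-- the grouping fold's bucket at c is the per-camera filter of the jpg list
lemma getDA_eq (jpgs : List String) (c : String) :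
    (jpgs.foldl (fun d f => d.modify (camOf f) [] (· ++ [f])) PySem.Dict.empty).getD c []
    = jpgs.filter (fun f => camOf f == c) := by
  have h : jpgs.foldl (fun d f => d.modify (camOf f) [] (· ++ [f])) PySem.Dict.empty
      = (jpgs.map (fun f => (camOf f, f))).foldl
          (fun d p => d.modify p.1 [] (· ++ [p.2])) PySem.Dict.empty := by
    rw [List.foldl_map]
  rw [h, PySem.Dict.getD_foldl_modify_append, PySem.Dict.getD_empty]
  simp [List.filter_map, List.map_map, Function.comp_def]

-- ===== VERDICT (by name: the statement is the Claim_ definition above) =====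
theorem get_images_cameras_from_list_spec : Claim_equal_get_images_cameras_from_list := by
  intro files _
  unfold Spec_get_images_cameras_from_list get_images_cameras_from_list get_images_cameras_from_list_alt
  simp only []
  rw [dictA_eq]
  set jpgs := files.filter (fun f => PySem.Str.endswith f ".jpg") with hj
  set dA := jpgs.foldl (fun d f => d.modify (camOf f) [] (· ++ [f])) PySem.Dict.empty with hd
  have hnd : dA.keys.Nodup := by
    rw [hd]
    exact PySem.Dict.nodup_keys_foldl_modify_key jpgs camOf [] (fun _ x => (· ++ [x]))
      PySem.Dict.empty (by simp [PySem.Dict.keys_empty])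
  have hkeys : dA.keys = PySem.Set.ofList (jpgs.map camOf) := keysA_eq jpgs
  have horder : jpgs.foldl (fun acc f =>
      if acc.contains (camOf f) then acc else acc ++ [camOf f]) []
      = PySem.Set.ofList (jpgs.map camOf) := orderB_eq jpgs
  rw [horder]
  refine Prod.ext ?_ ?_
  · show dA.items = _
    rw [PySem.Dict.items_eq_map_keys dA hnd [], hkeys]
    exact List.map_congr_left (fun c _ => by rw [getDA_eq jpgs c])
  · show PySem.Set.ofList dA.keys = PySem.Set.ofList (PySem.Set.ofList (jpgs.map camOf))
    rw [hkeys]
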